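-- pv_equiv track=rewrite | github.com/kamal-hamza/trendify | backend/api/services/fetchers.py | _prioritize_topics
-- ===== SOURCE A (Python) =====
-- from typing import Any, Dict, List, Tuple
--
-- def _prioritize_topics(topics: List[str]) -> List[str]:
--     """
--     Prioritize and filter topics for HN search
--
--     Args:
--         topics: List of discovered topics
--
--     Returns:
--         Filtered and prioritized list of topics
--     """
--     # Filter out very generic or non-tech topics
--     skip_keywords = {
--         "question", "help", "discussion", "tutorial", "guide",
--         "meta", "news", "announcement", "other", "general",
--     }
--
--     # Prioritize tech-focused topics
--     priority_keywords = {
--         "ai", "ml", "python", "javascript", "rust", "go", "java",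
--         "react", "vue", "angular", "docker", "kubernetes", "aws",
--         "machine-learning", "deep-learning", "llm", "gpt", "claude",
--         "openai", "anthropic", "security", "blockchain", "crypto",
--     }
--
--     prioritized = []
--     regular = []
--
--     for topic in topics:
--         topic_lower = topic.lower()
--
--         # Skip generic topics
--         if topic_lower in skip_keywords:
--             continue
--
--         # Skip very short topics
--         if len(topic) < 2:
--             continue
--
--         # Prioritize tech keywords
--         if topic_lower in priority_keywords or any(kw in topic_lower for kw in priority_keywords):
--             prioritized.append(topic)
--         else:
--             regular.append(topic)
--
--     # Return prioritized first, then regular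
--     return prioritized + regular
-- ===== SOURCE B (Python) =====
-- from typing import List
--
-- def _prioritize_topics(topics: List[str]) -> List[str]:
--     skip_keywords = {
--         "question", "help", "discussion", "tutorial", "guide",
--         "meta", "news", "announcement", "other", "general",
--     }
--     priority_keywords = {
--         "ai", "ml", "python", "javascript", "rust", "go", "java",
--         "react", "vue", "angular", "docker", "kubernetes", "aws",
--         "machine-learning", "deep-learning", "llm", "gpt", "claude",
--         "openai", "anthropic", "security", "blockchain", "crypto",
--     }
--     # One filtering pass, then one stable sort on a 2-valued key: prioritized
--     # topics (key 0) come first, each group keeping its original order.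
--     # (Exact membership in priority_keywords is subsumed by the substring test.)
--     filtered = [t for t in topics if t.lower() not in skip_keywords and len(t) >= 2]
--     return sorted(filtered,
--                   key=lambda t: 0 if any(kw in t.lower() for kw in priority_keywords) else 1)
-- ===== Notes on version B (the rewrite author's own statement) =====
-- stated objective: alternative
-- what changed: Replaces A's single loop with two accumulator lists by one filtering pass followed by one stable sort on a 2-valued priority key (prioritized topics get key 0), which also drops the redundant exact-membership test subsumed by the substring test.
import Mathlib
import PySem

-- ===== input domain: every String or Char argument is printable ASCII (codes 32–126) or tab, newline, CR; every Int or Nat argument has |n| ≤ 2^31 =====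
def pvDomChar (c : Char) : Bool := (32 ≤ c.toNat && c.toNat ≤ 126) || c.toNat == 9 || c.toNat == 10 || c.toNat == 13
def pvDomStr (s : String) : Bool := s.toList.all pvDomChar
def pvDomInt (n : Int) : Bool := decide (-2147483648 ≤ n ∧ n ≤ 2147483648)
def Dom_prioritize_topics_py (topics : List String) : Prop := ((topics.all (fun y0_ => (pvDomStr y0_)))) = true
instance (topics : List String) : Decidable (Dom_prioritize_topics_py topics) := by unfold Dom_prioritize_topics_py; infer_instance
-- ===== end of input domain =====

-- B replaces A's one-loop two-accumulator partition by a single filter pass followed by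
-- one stable sort on a 2-valued priority key (objective: alternative decomposition, same cost).

-- ===== PORT A =====
-- shared keyword constants (Python set literals, used only for membership / iteration in any())
def pvSkipKws : List String :=
  ["question", "help", "discussion", "tutorial", "guide",
   "meta", "news", "announcement", "other", "general"]

def pvPrioKws : List String :=
  ["ai", "ml", "python", "javascript", "rust", "go", "java",
   "react", "vue", "angular", "docker", "kubernetes", "aws",
   "machine-learning", "deep-learning", "llm", "gpt", "claude",
   "openai", "anthropic", "security", "blockchain", "crypto"]

def prioritize_topics_py (topics : List String) : List String :=
  let st := topics.foldl (fun (st : List String × List String) topic =>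
    let topic_lower := PySem.Str.lower topic
    if pvSkipKws.contains topic_lower then st
    else if PySem.Str.len topic < 2 then st
    else if pvPrioKws.contains topic_lower
            || pvPrioKws.any (fun kw => PySem.Str.isIn kw topic_lower) then
      (st.1 ++ [topic], st.2)
    else
      (st.1, st.2 ++ [topic])) ([], [])
  st.1 ++ st.2

-- ===== PORT B =====
def pvKeep (t : String) : Bool :=
  !(pvSkipKws.contains (PySem.Str.lower t)) && decide (2 ≤ PySem.Str.len t)

def pvKey (t : String) : Int :=
  if pvPrioKws.any (fun kw => PySem.Str.isIn kw (PySem.Str.lower t)) then 0 else 1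

def prioritize_topics_py_alt (topics : List String) : List String :=
  PySem.List.sorted (topics.filter pvKeep) pvKey false

-- ===== PRECONDITION & SPEC =====
def Spec_prioritize_topics_py (topics : List String) (out : List String) : Prop := out = prioritize_topics_py_alt topics
instance (topics : List String) (out : List String) : Decidable (Spec_prioritize_topics_py topics out) := by unfold Spec_prioritize_topics_py; infer_instance

-- ===== CLAIM (what is proved, stated in full; the proofs are below) =====
def Claim_equal_prioritize_topics_py : Prop := ∀ (topics : List String), Dom_prioritize_topics_py topics → Spec_prioritize_topics_py topics (prioritize_topics_py topics)

-- ===== LEMMAS AND PROOFS =====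

-- exact membership in pvPrioKws is subsumed by the substring test (a string contains itself)
lemma contains_imp_any (t : String) (h : pvPrioKws.contains t = true) :
    pvPrioKws.any (fun kw => PySem.Str.isIn kw t) = true := by
  rcases List.contains_iff_exists_mem_beq.mp h with ⟨kw, hmem, hbeq⟩
  refine List.any_eq_true.mpr ⟨kw, hmem, ?_⟩
  have heq : t = kw := by simpa using hbeq
  subst heq
  simp [PySem.Chars.isIn_iff_infix]

lemma prio_cond_eq (t : String) :
    (pvPrioKws.contains (PySem.Str.lower t)
      || pvPrioKws.any (fun kw => PySem.Str.isIn kw (PySem.Str.lower t)))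
    = pvPrioKws.any (fun kw => PySem.Str.isIn kw (PySem.Str.lower t)) := by
  cases h : pvPrioKws.contains (PySem.Str.lower t) with
  | false => simp
  | true => rw [contains_imp_any _ h]; simp

-- A's loop in closed form: it appends the kept prioritized topics to the first
-- accumulator and the kept regular topics to the second.
-- A's loop body, named for the proofs (identical to the lambda in the port)
def pvStepA (st : List String × List String) (topic : String) : List String × List String :=
  let topic_lower := PySem.Str.lower topic
  if pvSkipKws.contains topic_lower then st
  else if PySem.Str.len topic < 2 then st
  else if pvPrioKws.contains topic_lower
          || pvPrioKws.any (fun kw => PySem.Str.isIn kw topic_lower) then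
    (st.1 ++ [topic], st.2)
  else
    (st.1, st.2 ++ [topic])

lemma a_loop_closed (l : List String) : ∀ (P R : List String),
    l.foldl pvStepA (P, R)
    = (P ++ (l.filter pvKeep).filter (fun t => pvKey t = 0),
       R ++ (l.filter pvKeep).filter (fun t => pvKey t ≠ 0)) := by
  induction l with
  | nil => intro P R; simp
  | cons x xs ih =>
    intro P R
    rw [List.foldl_cons]
    cases hskip : pvSkipKws.contains (PySem.Str.lower x) with
    | true =>
      have hskip' : PySem.Str.lower x ∈ pvSkipKws := by simpa using hskip
      have hk : pvKeep x = false := by simp [pvKeep, hskip']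
      rw [show pvStepA (P, R) x = (P, R) from by
        unfold pvStepA; dsimp only; rw [hskip, if_pos rfl], ih P R]
      simp [hk]
    | false =>
      have hskip' : PySem.Str.lower x ∉ pvSkipKws := by simpa using hskip
      by_cases hlen : PySem.Str.len x < 2
      · have hlen' : (x.length : Int) < 2 := by simpa using hlen
        have hk : pvKeep x = false := by simp [pvKeep, hskip', PySem.Str.len_eq]; omega
        rw [show pvStepA (P, R) x = (P, R) from by
          unfold pvStepA; dsimp only; rw [hskip, if_neg (by simp), if_pos hlen], ih P R]
        simp [hk]
      · have hlen' : ¬ (x.length : Int) < 2 := by simpa using hlen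
        have hk : pvKeep x = true := by simp [pvKeep, hskip', PySem.Str.len_eq]; omega
        cases hp : pvPrioKws.any (fun kw => PySem.Str.isIn kw (PySem.Str.lower x)) with
        | true =>
          have hkey : pvKey x = 0 := by unfold pvKey; rw [hp]; simp
          rw [show pvStepA (P, R) x = (P ++ [x], R) from by
            unfold pvStepA; dsimp only
            rw [hskip, if_neg (by simp), if_neg hlen, prio_cond_eq, hp, if_pos rfl],
            ih (P ++ [x]) R]
          simp [hk, hkey]
        | false =>
          have hkey : pvKey x ≠ 0 := by unfold pvKey; rw [hp]; simp
          rw [show pvStepA (P, R) x = (P, R ++ [x]) from by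
            unfold pvStepA; dsimp only
            rw [hskip, if_neg (by simp), if_neg hlen, prio_cond_eq, hp, if_neg (by simp)],
            ih P (R ++ [x])]
          simp [hk, hkey]

-- inserting a key-0 element: it passes all key-0 elements and stops at the first key-1 element
lemma insertBy_zero_mid {α : Type} (k : α → Int) (x : α) (hx : k x = 0) :
    ∀ (A B : List α), (∀ a ∈ A, k a = 0) → (∀ b ∈ B, k b = 1) →
    PySem.List.insertBy (fun a b => decide (k a < k b)) x (A ++ B) = (A ++ [x]) ++ B := by
  intro A
  induction A with
  | nil =>
    intro B _ hB
    cases B with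
    | nil => simp [PySem.List.insertBy]
    | cons b bs =>
      have : k b = 1 := hB b (by simp)
      simp [PySem.List.insertBy, hx, this]
  | cons a as ih =>
    intro B hA hB
    have ha : k a = 0 := hA a (by simp)
    simp only [List.cons_append, PySem.List.insertBy]
    rw [if_neg (by simp [hx, ha])]
    simp [ih B (fun a ha => hA a (by simp [ha])) hB]

-- the stable sort on a {0,1}-valued key is the stable partition
lemma sort_two_valued {α : Type} (k : α → Int) (hk : ∀ t, k t = 0 ∨ k t = 1)
    (l : List α) : ∀ (A B : List α), (∀ a ∈ A, k a = 0) → (∀ b ∈ B, k b = 1) →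
    l.foldl (fun acc x => PySem.List.insertBy (fun a b => decide (k a < k b)) x acc) (A ++ B)
    = (A ++ l.filter (fun t => k t = 0)) ++ (B ++ l.filter (fun t => k t ≠ 0)) := by
  induction l with
  | nil => intro A B _ _; simp
  | cons x xs ih =>
    intro A B hA hB
    rcases hk x with hx | hx
    · simp only [List.foldl_cons]
      rw [insertBy_zero_mid k x hx A B hA hB]
      rw [ih (A ++ [x]) B (by intro a ha; rcases List.mem_append.mp ha with h | h
                              · exact hA a h
                              · simp at h; simpa [h] using hx) hB]
      simp [hx]
    · simp only [List.foldl_cons]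
      rw [PySem.List.insertBy_of_forall_not_before _ _ _ (by
        intro y hy
        rcases List.mem_append.mp hy with h | h
        · simp [hx, hA y h]
        · simp [hx, hB y h])]
      rw [List.append_assoc, ih A (B ++ [x])
        hA
        (by intro b hb; rcases List.mem_append.mp hb with h | h
            · exact hB b h
            · simp at h; simpa [h] using hx)]
      simp [hx]

lemma alt_closed (topics : List String) :
    prioritize_topics_py_alt topics
    = (topics.filter pvKeep).filter (fun t => pvKey t = 0)
      ++ (topics.filter pvKeep).filter (fun t => pvKey t ≠ 0) := by
  unfold prioritize_topics_py_alt
  rw [PySem.List.sorted_eq_foldl_insertBy]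
  have := sort_two_valued pvKey
    (fun t => by unfold pvKey; split <;> simp)
    (topics.filter pvKeep) [] [] (by simp) (by simp)
  simpa using this

-- ===== VERDICT (by name: the statement is the Claim_ definition above) =====
theorem prioritize_topics_py_spec : Claim_equal_prioritize_topics_py := by
  intro topics _
  unfold Spec_prioritize_topics_py
  have hA : prioritize_topics_py topics
      = (topics.foldl pvStepA ([], [])).1 ++ (topics.foldl pvStepA ([], [])).2 := rfl
  rw [hA, alt_closed, a_loop_closed topics [] []]
  simp
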